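-- pv_equiv track=rewrite | github.com/Sallyrideauto/codetree-TILs | 240504/홀수 짝수의 묶음/odd-even-bundle.py | max_alternating_groups
-- ===== SOURCE A (Python) =====
-- def max_alternating_groups(n, numbers):
--     # 각 숫자의 누적 합을 계산하여 사용
--     prefix_sums = [0] * (n + 1)
--     for i in range(1, n + 1):
--         prefix_sums[i] = prefix_sums[i - 1] + numbers[i - 1]
--
--     # dp[i][0]는 i까지 고려하여 마지막 그룹이 짝수인 최대 그룹 수
--     # dp[i][1]는 i까지 고려하여 마지막 그룹이 홀수인 최대 그룹 수
--     dp = [[0 for _ in range(2)] for _ in range(n + 1)]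
--
--     for i in range(1, n + 1):
--         for j in range(i):
--             group_sum = prefix_sums[i] - prefix_sums[j]
--             if group_sum % 2 == 0:
--                 dp[i][0] = max(dp[i][0], dp[j][1] + 1)  # 현재 짝수 그룹이면 이전에 홀수 그룹이어야 함
--             else:
--                 dp[i][1] = max(dp[i][1], dp[j][0] + 1)  # 현재 홀수 그룹이면 이전에 짝수 그룹이어야 함
--
--     # 최대 그룹 수를 찾음
--     return max(dp[n][0], dp[n][1])
-- ===== SOURCE B (Python) =====
-- def max_alternating_groups(n, numbers):
--     # One-pass DP keyed by prefix-sum parity: m0[p]/m1[p] hold the running maxima of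
--     # dp[j][0]/dp[j][1] over prefixes j with parity p (-1 = no such prefix yet).
--     m0 = [0, -1]
--     m1 = [0, -1]
--     pref = 0
--     d0 = d1 = 0
--     for k in range(n):
--         pref += numbers[k]
--         p = pref % 2
--         d0 = max(0, m1[p] + 1)
--         d1 = max(0, m0[1 - p] + 1)
--         if d0 > m0[p]:
--             m0[p] = d0
--         if d1 > m1[p]:
--             m1[p] = d1
--     return max(d0, d1)
-- ===== Notes on version B (the rewrite author's own statement) =====
-- stated objective: faster
-- what changed: Replaced the O(n^2) all-pairs group-split DP (inner scan over every earlier cut point) by a single pass keeping, per prefix-sum parity, the running maxima of the two DP values, so each element is processed in O(1).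
-- crash fix: For n < 0 A raises IndexError (it indexes dp[n] into an empty/short table), while B's loop is simply empty and it returns 0. — e.g. on max_alternating_groups(-1, []): A raises IndexError, B returns 0
import Mathlib
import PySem

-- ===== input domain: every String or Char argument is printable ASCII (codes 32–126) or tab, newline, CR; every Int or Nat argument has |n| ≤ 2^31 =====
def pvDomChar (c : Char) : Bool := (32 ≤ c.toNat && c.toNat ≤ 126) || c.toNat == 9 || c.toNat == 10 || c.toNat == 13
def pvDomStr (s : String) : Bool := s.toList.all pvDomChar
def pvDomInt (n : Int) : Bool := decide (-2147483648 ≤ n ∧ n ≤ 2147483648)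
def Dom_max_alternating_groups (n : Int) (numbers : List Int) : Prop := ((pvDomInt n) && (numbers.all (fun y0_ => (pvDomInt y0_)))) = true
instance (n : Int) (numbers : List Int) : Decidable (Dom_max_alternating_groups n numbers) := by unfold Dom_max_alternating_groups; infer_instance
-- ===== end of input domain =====

-- B replaces A's O(n^2) cut-point scan by a one-pass DP keyed by prefix-sum parity (running maxima per parity).

-- ===== PORT A =====
def max_alternating_groups (n : Int) (numbers : List Int) : Int :=
  let prefix_sums : List Int :=
    (PySem.List.pyRange 1 (n+1) 1).foldl
      (fun ps i =>
        PySem.List.pySetD ps i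
          (PySem.List.pyGetD ps (i-1) 0 + PySem.List.pyGetD numbers (i-1) 0))
      (List.replicate (n+1).toNat 0)
  let dp : List (Int × Int) :=
    (PySem.List.pyRange 1 (n+1) 1).foldl
      (fun dp i =>
        let pair :=
          (PySem.List.pyRange 0 i 1).foldl
            (fun (pr : Int × Int) j =>
              let group_sum := PySem.List.pyGetD prefix_sums i 0 - PySem.List.pyGetD prefix_sums j 0
              if PySem.Int.mod group_sum 2 = 0 then
                (max pr.1 ((PySem.List.pyGetD dp j ((0:Int),(0:Int))).2 + 1), pr.2)
              else
                (pr.1, max pr.2 ((PySem.List.pyGetD dp j ((0:Int),(0:Int))).1 + 1)))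
            (PySem.List.pyGetD dp i ((0:Int),(0:Int)))
        PySem.List.pySetD dp i pair)
      (List.replicate (n+1).toNat ((0:Int),(0:Int)))
  max (PySem.List.pyGetD dp n ((0:Int),(0:Int))).1 (PySem.List.pyGetD dp n ((0:Int),(0:Int))).2

-- ===== PORT B =====
-- state: (m0, m1, pref, d0, d1); mX.1 is the parity-0 slot, mX.2 the parity-1 slot
def max_alternating_groups_alt (n : Int) (numbers : List Int) : Int :=
  let st :=
    (PySem.List.pyRange 0 n 1).foldl
      (fun (st : (Int × Int) × (Int × Int) × Int × Int × Int) k =>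
        let m0 := st.1
        let m1 := st.2.1
        let pref := st.2.2.1 + PySem.List.pyGetD numbers k 0
        let p := PySem.Int.mod pref 2
        let d0 := max 0 ((if p = 0 then m1.1 else m1.2) + 1)
        let d1 := max 0 ((if p = 0 then m0.2 else m0.1) + 1)
        let m0' := if p = 0 then (if d0 > m0.1 then d0 else m0.1, m0.2)
                   else (m0.1, if d0 > m0.2 then d0 else m0.2)
        let m1' := if p = 0 then (if d1 > m1.1 then d1 else m1.1, m1.2)
                   else (m1.1, if d1 > m1.2 then d1 else m1.2)
        (m0', m1', pref, d0, d1))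
      (((0:Int), (-1:Int)), ((0:Int), (-1:Int)), (0:Int), (0:Int), (0:Int))
  max st.2.2.2.1 st.2.2.2.2

-- ===== PRECONDITION & SPEC =====
-- Pre_ excludes exactly the inputs on which the Python A raises IndexError:
-- n < 0 (dp[n] indexes past an empty/short table) or n > len(numbers) (numbers[i-1]).
def Pre_max_alternating_groups (n : Int) (numbers : List Int) : Prop :=
  0 ≤ n ∧ n ≤ (numbers.length : Int)
instance (n : Int) (numbers : List Int) : Decidable (Pre_max_alternating_groups n numbers) := by
  unfold Pre_max_alternating_groups; infer_instance

def pvWitness_max_alternating_groups : Int × List Int := (3, [1, 2, 3])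

-- For n < 0 A raises IndexError (dp[n] into an empty table) while B's loop is empty and it returns 0.
def Raises_max_alternating_groups (n : Int) (numbers : List Int) : Prop := n < 0
instance (n : Int) (numbers : List Int) : Decidable (Raises_max_alternating_groups n numbers) := by
  unfold Raises_max_alternating_groups; infer_instance
def pvRaiseWitness_max_alternating_groups : Int × List Int := (-1, [])
def pvRaiseWitnessOut_max_alternating_groups : Int := 0

def Spec_max_alternating_groups (n : Int) (numbers : List Int) (out : Int) : Prop :=
  out = max_alternating_groups_alt n numbers
instance (n : Int) (numbers : List Int) (out : Int) : Decidable (Spec_max_alternating_groups n numbers out) := by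
  unfold Spec_max_alternating_groups; infer_instance

-- ===== CLAIM (what is proved, stated in full; the proofs are below) =====
def Claim_equal_max_alternating_groups : Prop := ∀ (n : Int) (numbers : List Int), Dom_max_alternating_groups n numbers → Pre_max_alternating_groups n numbers → Spec_max_alternating_groups n numbers (max_alternating_groups n numbers)

def Claim_raises_max_alternating_groups : Prop := (∀ (n : Int) (numbers : List Int), Dom_max_alternating_groups n numbers → Raises_max_alternating_groups n numbers → ¬ Pre_max_alternating_groups n numbers) ∧ (Dom_max_alternating_groups (pvRaiseWitness_max_alternating_groups.1) (pvRaiseWitness_max_alternating_groups.2) ∧ Raises_max_alternating_groups (pvRaiseWitness_max_alternating_groups.1) (pvRaiseWitness_max_alternating_groups.2) ∧ max_alternating_groups_alt (pvRaiseWitness_max_alternating_groups.1) (pvRaiseWitness_max_alternating_groups.2) = pvRaiseWitnessOut_max_alternating_groups)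

-- ===== LEMMAS AND PROOFS =====

-- the common mathematical model: prefix sums, the DP table A builds, per-parity maxima B keeps
def pvS (nums : List Int) : Nat → Int
  | 0 => 0
  | k+1 => pvS nums k + nums.getD k 0

def pvPar (nums : List Int) (k : Nat) : Int := PySem.Int.mod (pvS nums k) 2

def pvPair (nums : List Int) (dpf : Nat → Int × Int) (i : Nat) : Int × Int :=
  (List.range i).foldl
    (fun pr j =>
      if PySem.Int.mod (pvS nums i - pvS nums j) 2 = 0 then
        (max pr.1 ((dpf j).2 + 1), pr.2)
      else
        (pr.1, max pr.2 ((dpf j).1 + 1)))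
    (0, 0)

def pvTbl (nums : List Int) : Nat → List (Int × Int)
  | 0 => [((0:Int), (0:Int))]
  | i+1 => pvTbl nums i ++ [pvPair nums (fun j => (pvTbl nums i).getD j (0, 0)) (i+1)]

def pvDp (nums : List Int) (i : Nat) : Int × Int := (pvTbl nums i).getD i (0, 0)

def pvM (f : Int × Int → Int) (nums : List Int) (p : Int) (k : Nat) : Int :=
  (List.range k).foldl (fun a j => if pvPar nums j = p then max a (f (pvDp nums j)) else a) (-1)

theorem pvTbl_length (nums : List Int) (i : Nat) : (pvTbl nums i).length = i + 1 := by
  induction i with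
  | zero => rfl
  | succ i ih => simp [pvTbl, ih]

theorem pvTbl_getD_of_le (nums : List Int) (i j : Nat) (h : j ≤ i) :
    (pvTbl nums i).getD j (0, 0) = pvDp nums j := by
  induction i with
  | zero => interval_cases j <;> rfl
  | succ i ih =>
      rcases Nat.lt_or_ge j (i+1) with hj | hj
      · rw [pvTbl, List.getD_append _ _ _ _ (by rw [pvTbl_length]; omega)]
        exact ih (by omega)
      · have hj' : j = i + 1 := by omega
        subst hj'
        rfl

theorem pvTbl_succ (nums : List Int) (i : Nat) :
    pvTbl nums (i+1) = pvTbl nums i ++ [pvDp nums (i+1)] := by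
  have : pvDp nums (i+1)
      = pvPair nums (fun j => (pvTbl nums i).getD j (0, 0)) (i+1) := by
    rw [pvDp, pvTbl, List.getD_eq_getElem?_getD,
        List.getElem?_append_right (by simp [pvTbl_length])]
    simp [pvTbl_length]
  rw [pvTbl, this]

theorem pvDp_succ (nums : List Int) (i : Nat) :
    pvDp nums (i+1) = pvPair nums (pvDp nums) (i+1) := by
  have h : pvDp nums (i+1)
      = pvPair nums (fun j => (pvTbl nums i).getD j (0, 0)) (i+1) := by
    rw [pvDp, pvTbl, List.getD_eq_getElem?_getD,
        List.getElem?_append_right (by simp [pvTbl_length])]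
    simp [pvTbl_length]
  rw [h, pvPair, pvPair]
  apply PySem.List.foldl_congr_mem
  intro acc j hj
  rw [List.mem_range] at hj
  rw [pvTbl_getD_of_le nums i j (by omega)]

-- ======== A-side characterization ========

theorem prefA_inv (numbers : List Int) (N : Nat) (k : Nat) (hk : k ≤ N) :
    (PySem.List.pyRange 1 ((k:Int)+1) 1).foldl
      (fun ps i =>
        PySem.List.pySetD ps i
          (PySem.List.pyGetD ps (i-1) 0 + PySem.List.pyGetD numbers (i-1) 0))
      (List.replicate (N+1) 0)
    = (List.range (k+1)).map (pvS numbers) ++ List.replicate (N - k) (0:Int) := by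
  induction k with
  | zero =>
      rw [PySem.List.pyRange_one_eq_nil (by omega)]
      simp [List.replicate_succ, pvS]
  | succ k ih =>
      have hk' : k ≤ N := by omega
      have hsplit : PySem.List.pyRange 1 ((k:Int)+1+1) 1
          = PySem.List.pyRange 1 ((k:Int)+1) 1 ++ [(k:Int)+1] := by
        exact PySem.List.pyRange_one_succ_right (by omega)
      have hcast : ((k+1:Nat):Int) + 1 = (k:Int)+1+1 := by push_cast; ring
      rw [hcast, hsplit, List.foldl_append, ih hk']
      have hlen : ((List.range (k+1)).map (pvS numbers)).length = k + 1 := by simp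
      have hget : PySem.List.pyGetD
          ((List.range (k+1)).map (pvS numbers) ++ List.replicate (N - k) (0:Int))
          ((k:Int)+1-1) 0 = pvS numbers k := by
        have : (k:Int)+1-1 = ((k:Nat):Int) := by ring
        rw [this, PySem.List.pyGetD_natCast]
        rw [List.getD_append _ _ _ _ (by omega)]
        simp
      have hset : ((k:Int)+1) = (((k+1:Nat)):Int) := by push_cast; ring
      rw [List.foldl_cons, List.foldl_nil, hget, hset, PySem.List.pySetD_natCast]
      have hrep : List.replicate (N - k) (0:Int) = 0 :: List.replicate (N - (k+1)) 0 := by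
        have : N - k = (N - (k+1)) + 1 := by omega
        rw [this, List.replicate_succ]
      rw [hrep, List.set_append_right _ _ (by omega)]
      have : k + 1 - ((List.range (k+1)).map (pvS numbers)).length = 0 := by omega
      rw [this, List.set_cons_zero]
      have hval : pvS numbers k + PySem.List.pyGetD numbers ((k:Nat):Int) 0 = pvS numbers (k+1) := by
        rw [PySem.List.pyGetD_natCast]; rfl
      have hnum : ((k+1:Nat):Int) - 1 = ((k:Nat):Int) := by push_cast; ring
      rw [hnum, hval]
      conv_rhs => rw [List.range_succ]
      simp

theorem dpA_inv (numbers : List Int) (N : Nat) (k : Nat) (hk : k ≤ N) :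
    (PySem.List.pyRange 1 ((k:Int)+1) 1).foldl
      (fun dp i =>
        let pair :=
          (PySem.List.pyRange 0 i 1).foldl
            (fun (pr : Int × Int) j =>
              let group_sum := PySem.List.pyGetD ((List.range (N+1)).map (pvS numbers)) i 0
                - PySem.List.pyGetD ((List.range (N+1)).map (pvS numbers)) j 0
              if PySem.Int.mod group_sum 2 = 0 then
                (max pr.1 ((PySem.List.pyGetD dp j ((0:Int),(0:Int))).2 + 1), pr.2)
              else
                (pr.1, max pr.2 ((PySem.List.pyGetD dp j ((0:Int),(0:Int))).1 + 1)))
            (PySem.List.pyGetD dp i ((0:Int),(0:Int)))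
        PySem.List.pySetD dp i pair)
      (List.replicate (N+1) ((0:Int),(0:Int)))
    = pvTbl numbers k ++ List.replicate (N - k) ((0:Int),(0:Int)) := by
  induction k with
  | zero =>
      rw [PySem.List.pyRange_one_eq_nil (by omega)]
      simp [List.replicate_succ, pvTbl]
  | succ k ih =>
      have hk' : k ≤ N := by omega
      have hcast : ((k+1:Nat):Int) + 1 = (k:Int)+1+1 := by push_cast; ring
      rw [hcast, PySem.List.pyRange_one_succ_right (by omega), List.foldl_append, ih hk']
      rw [List.foldl_cons, List.foldl_nil]
      have hlenT : (pvTbl numbers k).length = k + 1 := pvTbl_length numbers k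
      have hrep : List.replicate (N - k) ((0:Int),(0:Int))
          = ((0:Int),(0:Int)) :: List.replicate (N - (k+1)) ((0:Int),(0:Int)) := by
        have : N - k = (N - (k+1)) + 1 := by omega
        rw [this, List.replicate_succ]
      -- the start value dp[i] is (0,0)
      have hstart : PySem.List.pyGetD
          (pvTbl numbers k ++ List.replicate (N - k) ((0:Int),(0:Int)))
          ((k:Int)+1) ((0:Int),(0:Int)) = ((0:Int),(0:Int)) := by
        have hset : ((k:Int)+1) = (((k+1:Nat)):Int) := by push_cast; ring
        rw [hset, PySem.List.pyGetD_natCast, hrep]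
        rw [List.getD_eq_getElem?_getD, List.getElem?_append_right (by omega)]
        simp [hlenT]
      -- the inner fold computes pvDp (k+1)
      have hinner :
          (PySem.List.pyRange 0 ((k:Int)+1) 1).foldl
            (fun (pr : Int × Int) j =>
              let group_sum := PySem.List.pyGetD ((List.range (N+1)).map (pvS numbers)) ((k:Int)+1) 0
                - PySem.List.pyGetD ((List.range (N+1)).map (pvS numbers)) j 0
              if PySem.Int.mod group_sum 2 = 0 then
                (max pr.1 ((PySem.List.pyGetD (pvTbl numbers k ++ List.replicate (N - k) ((0:Int),(0:Int))) j ((0:Int),(0:Int))).2 + 1), pr.2)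
              else
                (pr.1, max pr.2 ((PySem.List.pyGetD (pvTbl numbers k ++ List.replicate (N - k) ((0:Int),(0:Int))) j ((0:Int),(0:Int))).1 + 1)))
            ((0:Int),(0:Int))
          = pvDp numbers (k+1) := by
        have hset : ((k:Int)+1) = (((k+1:Nat)):Int) := by push_cast; ring
        rw [hset, PySem.List.pyRange_zero_natCast, List.foldl_map, pvDp_succ, pvPair]
        apply PySem.List.foldl_congr_mem
        intro acc j hj
        rw [List.mem_range] at hj
        have hgi : PySem.List.pyGetD ((List.range (N+1)).map (pvS numbers)) (((k+1:Nat)):Int) 0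
            = pvS numbers (k+1) := by
          rw [PySem.List.pyGetD_natCast, List.getD_eq_getElem?_getD]
          simp [List.getElem?_map, List.getElem?_range, (by omega : k+1 < N+1)]
        have hgj : PySem.List.pyGetD ((List.range (N+1)).map (pvS numbers)) ((j:Nat):Int) 0
            = pvS numbers j := by
          rw [PySem.List.pyGetD_natCast, List.getD_eq_getElem?_getD]
          simp [List.getElem?_map, List.getElem?_range, (by omega : j < N+1)]
        have hdj : PySem.List.pyGetD (pvTbl numbers k ++ List.replicate (N - k) ((0:Int),(0:Int)))
            ((j:Nat):Int) ((0:Int),(0:Int)) = pvDp numbers j := by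
          rw [PySem.List.pyGetD_natCast]
          rw [List.getD_append _ _ _ _ (by omega)]
          exact pvTbl_getD_of_le numbers k j (by omega)
        simp only [hgi, hgj, hdj]
      rw [hstart, hinner]
      have hset : ((k:Int)+1) = (((k+1:Nat)):Int) := by push_cast; ring
      rw [hset, PySem.List.pySetD_natCast, hrep, List.set_append_right _ _ (by omega)]
      have : k + 1 - (pvTbl numbers k).length = 0 := by omega
      rw [this, List.set_cons_zero, pvTbl_succ]
      simp

theorem A_char (n : Int) (numbers : List Int) (h0 : 0 ≤ n) :
    max_alternating_groups n numbers
      = max (pvDp numbers n.toNat).1 (pvDp numbers n.toNat).2 := by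
  obtain ⟨N, rfl⟩ : ∃ N : Nat, n = (N:Int) := ⟨n.toNat, (Int.toNat_of_nonneg h0).symm⟩
  rw [max_alternating_groups]
  have hN1 : ((N:Int)+1).toNat = N + 1 := by omega
  rw [hN1]
  have hpre := prefA_inv numbers N N (le_refl N)
  rw [Nat.sub_self, List.replicate_zero, List.append_nil] at hpre
  rw [hpre]
  have hdp := dpA_inv numbers N N (le_refl N)
  rw [Nat.sub_self, List.replicate_zero, List.append_nil] at hdp
  rw [hdp]
  have hget : PySem.List.pyGetD (pvTbl numbers N) ((N:Nat):Int) ((0:Int),(0:Int))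
      = pvDp numbers N := by
    rw [PySem.List.pyGetD_natCast]
    exact pvTbl_getD_of_le numbers N N (le_refl N)
  rw [Int.toNat_natCast, hget]

-- ======== B-side characterization ========

-- parity of a prefix sum is 0 or 1
theorem pvPar_cases (nums : List Int) (k : Nat) : pvPar nums k = 0 ∨ pvPar nums k = 1 := by
  rw [pvPar, PySem.Int.mod_eq_emod_of_pos (by omega)]
  omega

theorem par_cond (nums : List Int) (i j : Nat) :
    PySem.Int.mod (pvS nums i - pvS nums j) 2 = 0 ↔ pvPar nums j = pvPar nums i := by
  rw [pvPar, pvPar, PySem.Int.mod_eq_emod_of_pos (by omega),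
      PySem.Int.mod_eq_emod_of_pos (by omega), PySem.Int.mod_eq_emod_of_pos (by omega)]
  constructor
  · intro h; omega
  · intro h; omega

-- component split of the pair fold
theorem pair_fold_fst (nums : List Int) (dpf : Nat → Int × Int) (i : Nat) (L : List Nat) (pr : Int × Int) :
    (L.foldl
      (fun pr j =>
        if PySem.Int.mod (pvS nums i - pvS nums j) 2 = 0 then
          (max pr.1 ((dpf j).2 + 1), pr.2)
        else
          (pr.1, max pr.2 ((dpf j).1 + 1)))
      pr).1
    = L.foldl
        (fun a j => if pvPar nums j = pvPar nums i then max a ((dpf j).2 + 1) else a)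
        pr.1 := by
  induction L generalizing pr with
  | nil => rfl
  | cons x L ih =>
      rw [List.foldl_cons, List.foldl_cons, ih]
      by_cases h : PySem.Int.mod (pvS nums i - pvS nums x) 2 = 0
      · rw [if_pos h, if_pos ((par_cond nums i x).mp h)]
      · rw [if_neg h, if_neg (fun hc => h ((par_cond nums i x).mpr hc))]

theorem pair_fold_snd (nums : List Int) (dpf : Nat → Int × Int) (i : Nat) (L : List Nat) (pr : Int × Int) :
    (L.foldl
      (fun pr j =>
        if PySem.Int.mod (pvS nums i - pvS nums j) 2 = 0 then
          (max pr.1 ((dpf j).2 + 1), pr.2)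
        else
          (pr.1, max pr.2 ((dpf j).1 + 1)))
      pr).2
    = L.foldl
        (fun a j => if pvPar nums j = pvPar nums i then a else max a ((dpf j).1 + 1))
        pr.2 := by
  induction L generalizing pr with
  | nil => rfl
  | cons x L ih =>
      rw [List.foldl_cons, List.foldl_cons, ih]
      by_cases h : PySem.Int.mod (pvS nums i - pvS nums x) 2 = 0
      · rw [if_pos h, if_pos ((par_cond nums i x).mp h)]
      · rw [if_neg h, if_neg (fun hc => h ((par_cond nums i x).mpr hc))]

-- running max with a +1 bump versus the raw running max started at -1
theorem foldmax (P : Nat → Prop) [DecidablePred P] (f : Nat → Int) (L : List Nat) :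
    L.foldl (fun a j => if P j then max a (f j + 1) else a) 0
      = max 0 (L.foldl (fun a j => if P j then max a (f j) else a) (-1) + 1) := by
  induction L using List.reverseRecOn with
  | nil => simp
  | append_singleton L x ih =>
      rw [List.foldl_append, List.foldl_append, List.foldl_cons, List.foldl_nil,
          List.foldl_cons, List.foldl_nil, ih]
      by_cases h : P x
      · rw [if_pos h, if_pos h]
        omega
      · rw [if_neg h, if_neg h]

theorem pvDp_fst (nums : List Int) (i : Nat) :
    (pvDp nums (i+1)).1
      = max 0 (pvM Prod.snd nums (pvPar nums (i+1)) (i+1) + 1) := by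
  rw [pvDp_succ, pvPair, pair_fold_fst, pvM]
  exact foldmax (fun j => pvPar nums j = pvPar nums (i+1)) (fun j => (pvDp nums j).2) _

theorem pvDp_snd (nums : List Int) (i : Nat) :
    (pvDp nums (i+1)).2
      = max 0 (pvM Prod.fst nums (1 - pvPar nums (i+1)) (i+1) + 1) := by
  rw [pvDp_succ, pvPair, pair_fold_snd, pvM]
  have h : ∀ (L : List Nat) (a : Int),
      L.foldl (fun a j => if pvPar nums j = pvPar nums (i+1) then a else max a ((pvDp nums j).1 + 1)) a
      = L.foldl (fun a j => if pvPar nums j = 1 - pvPar nums (i+1) then max a ((pvDp nums j).1 + 1) else a) a := by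
    intro L
    induction L with
    | nil => intro a; rfl
    | cons x L ih =>
        intro a
        rw [List.foldl_cons, List.foldl_cons, ih]
        congr 1
        rcases pvPar_cases nums (i+1) with h1 | h1 <;>
          rcases pvPar_cases nums x with h2 | h2 <;>
          simp [h1, h2]
  rw [h]
  exact foldmax (fun j => pvPar nums j = 1 - pvPar nums (i+1)) (fun j => (pvDp nums j).1) _

theorem pvM_succ (f : Int × Int → Int) (nums : List Int) (p : Int) (k : Nat) :
    pvM f nums p (k+1)
      = if pvPar nums k = p then max (pvM f nums p k) (f (pvDp nums k)) else pvM f nums p k := by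
  rw [pvM, pvM, List.range_succ, List.foldl_append, List.foldl_cons, List.foldl_nil]

-- the invariant of B's single pass
theorem B_inv (nums : List Int) (k : Nat) :
    (List.range k).foldl
      (fun (st : (Int × Int) × (Int × Int) × Int × Int × Int) (j : Nat) =>
        let m0 := st.1
        let m1 := st.2.1
        let pref := st.2.2.1 + PySem.List.pyGetD nums ((j:Nat):Int) 0
        let p := PySem.Int.mod pref 2
        let d0 := max 0 ((if p = 0 then m1.1 else m1.2) + 1)
        let d1 := max 0 ((if p = 0 then m0.2 else m0.1) + 1)
        let m0' := if p = 0 then (if d0 > m0.1 then d0 else m0.1, m0.2)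
                   else (m0.1, if d0 > m0.2 then d0 else m0.2)
        let m1' := if p = 0 then (if d1 > m1.1 then d1 else m1.1, m1.2)
                   else (m1.1, if d1 > m1.2 then d1 else m1.2)
        (m0', m1', pref, d0, d1))
      (((0:Int), (-1:Int)), ((0:Int), (-1:Int)), (0:Int), (0:Int), (0:Int))
    = ((pvM Prod.fst nums 0 (k+1), pvM Prod.fst nums 1 (k+1)),
       (pvM Prod.snd nums 0 (k+1), pvM Prod.snd nums 1 (k+1)),
       pvS nums k, (pvDp nums k).1, (pvDp nums k).2) := by
  induction k with
  | zero =>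
      have h0 : pvPar nums 0 = 0 := by
        rw [pvPar, pvS, PySem.Int.mod_eq_emod_of_pos (by omega)]
        rfl
      simp only [List.range_zero, List.foldl_nil]
      rw [pvM, pvM, pvM, pvM]
      norm_num [List.range_one, List.range_succ, h0, pvDp, pvTbl, pvS]
  | succ k ih =>
      rw [List.range_succ, List.foldl_append, ih]
      simp only [List.foldl_cons, List.foldl_nil]
      have hpref : pvS nums k + PySem.List.pyGetD nums ((k:Nat):Int) 0 = pvS nums (k+1) := by
        rw [PySem.List.pyGetD_natCast]; rfl
      simp only [hpref]
      have hp : PySem.Int.mod (pvS nums (k+1)) 2 = pvPar nums (k+1) := rfl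
      simp only [hp]
      have hifsnd : (if pvPar nums (k+1) = 0 then pvM Prod.snd nums 0 (k+1) else pvM Prod.snd nums 1 (k+1))
          = pvM Prod.snd nums (pvPar nums (k+1)) (k+1) := by
        rcases pvPar_cases nums (k+1) with h | h <;> simp [h]
      have hiffst : (if pvPar nums (k+1) = 0 then pvM Prod.fst nums 1 (k+1) else pvM Prod.fst nums 0 (k+1))
          = pvM Prod.fst nums (1 - pvPar nums (k+1)) (k+1) := by
        rcases pvPar_cases nums (k+1) with h | h <;> simp [h]
      rw [hifsnd, hiffst, ← pvDp_fst, ← pvDp_snd]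
      have hmax : ∀ a b : Int, (if b > a then b else a) = max a b := by
        intro a b; split_ifs <;> omega
      simp only [hmax, Prod.mk.injEq]
      rcases pvPar_cases nums (k+1) with h | h <;>
        rw [pvM_succ Prod.fst nums 0 (k+1), pvM_succ Prod.fst nums 1 (k+1),
            pvM_succ Prod.snd nums 0 (k+1), pvM_succ Prod.snd nums 1 (k+1)] <;>
        simp [h] <;> omega

theorem B_char (n : Int) (numbers : List Int) (h0 : 0 ≤ n) :
    max_alternating_groups_alt n numbers
      = max (pvDp numbers n.toNat).1 (pvDp numbers n.toNat).2 := by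
  obtain ⟨N, rfl⟩ : ∃ N : Nat, n = (N:Int) := ⟨n.toNat, (Int.toNat_of_nonneg h0).symm⟩
  rw [max_alternating_groups_alt]
  rw [PySem.List.pyRange_zero_natCast, List.foldl_map, B_inv numbers N, Int.toNat_natCast]

-- ===== VERDICT (by name: the statement is the Claim_ definition above) =====
theorem max_alternating_groups_spec : Claim_equal_max_alternating_groups := by
  intro n numbers _hdom hpre
  unfold Spec_max_alternating_groups
  rw [A_char n numbers hpre.1, B_char n numbers hpre.1]

@[simp] theorem max_alternating_groups_raises : Claim_raises_max_alternating_groups := by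
  unfold Claim_raises_max_alternating_groups
  constructor
  · intro n numbers _ hr hpre
    unfold Raises_max_alternating_groups at hr
    unfold Pre_max_alternating_groups at hpre
    omega
  · exact ⟨by decide, by decide, by decide⟩
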